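-- pv_equiv track=rewrite | github.com/quadrismegistus/hashstash | filehashcache/etc/performance.py | generate_profile_sizes
-- ===== SOURCE A (Python) =====
-- INITIAL_SIZE = 1024
--
-- def generate_profile_sizes(num_sizes: int = 5, multiplier: int = 4, initial_size: int = INITIAL_SIZE) -> tuple:
--     profile_sizes = []
--     for n in range(num_sizes):
--         if not profile_sizes:
--             profile_sizes.append(initial_size)
--         else:
--             profile_sizes.append(profile_sizes[-1] * multiplier)
--     return tuple(profile_sizes)
-- ===== SOURCE B (Python) =====
-- INITIAL_SIZE = 1024
--
-- def generate_profile_sizes(num_sizes: int = 5, multiplier: int = 4, initial_size: int = INITIAL_SIZE) -> tuple: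
--     if num_sizes <= 0:
--         return ()
--     if num_sizes == 1:
--         return (initial_size,)
--     half = num_sizes // 2
--     return (generate_profile_sizes(half, multiplier, initial_size)
--             + generate_profile_sizes(num_sizes - half, multiplier,
--                                      initial_size * multiplier**half))
-- ===== Notes on version B (the rewrite author's own statement) =====
-- stated objective: alternative
-- what changed: Replaced A's left-to-right accumulator loop (each element appended as previous*multiplier with a first/else branch) by a divide-and-conquer recursion that splits the count in half and builds the second half from a seed pre-scaled by multiplier**half, concatenating the two halves.
import Mathlib
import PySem

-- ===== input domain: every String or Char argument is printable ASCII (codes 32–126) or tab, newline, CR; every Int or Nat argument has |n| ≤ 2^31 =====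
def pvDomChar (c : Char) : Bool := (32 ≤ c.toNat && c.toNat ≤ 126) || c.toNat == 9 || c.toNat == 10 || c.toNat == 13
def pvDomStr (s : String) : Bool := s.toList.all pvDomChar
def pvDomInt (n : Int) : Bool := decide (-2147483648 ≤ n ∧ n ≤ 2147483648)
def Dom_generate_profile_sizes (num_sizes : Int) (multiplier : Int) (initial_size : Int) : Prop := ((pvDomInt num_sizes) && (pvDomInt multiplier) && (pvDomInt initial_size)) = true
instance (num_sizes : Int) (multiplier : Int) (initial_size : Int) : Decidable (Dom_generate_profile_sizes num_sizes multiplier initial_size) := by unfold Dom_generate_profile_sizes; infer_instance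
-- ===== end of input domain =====

-- ===== PORT A =====
-- Header: B replaces A's accumulator loop by structural recursion on the count with a pre-multiplied seed (alternative decomposition; same cost).
def generate_profile_sizes (num_sizes : Int) (multiplier : Int) (initial_size : Int) : List Int :=
  (PySem.List.pyRange 0 num_sizes 1).foldl
    (fun profile_sizes _ =>
      if profile_sizes = [] then profile_sizes ++ [initial_size]
      else profile_sizes ++ [profile_sizes.getLast! * multiplier])
    []

-- ===== PORT B =====
def generate_profile_sizes_alt (num_sizes : Int) (multiplier : Int) (initial_size : Int) : List Int :=
  if num_sizes ≤ 0 then []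
  else if num_sizes = 1 then [initial_size]
  else
    generate_profile_sizes_alt (PySem.Int.floordiv num_sizes 2) multiplier initial_size ++
    generate_profile_sizes_alt (num_sizes - PySem.Int.floordiv num_sizes 2) multiplier
      (initial_size * multiplier ^ (PySem.Int.floordiv num_sizes 2).toNat)
termination_by num_sizes.toNat
decreasing_by
  all_goals simp [PySem.Int.floordiv, Int.fdiv_eq_ediv]; omega

-- ===== PRECONDITION & SPEC =====
def Spec_generate_profile_sizes (num_sizes : Int) (multiplier : Int) (initial_size : Int) (out : List Int) : Prop := out = generate_profile_sizes_alt num_sizes multiplier initial_size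
instance (num_sizes : Int) (multiplier : Int) (initial_size : Int) (out : List Int) : Decidable (Spec_generate_profile_sizes num_sizes multiplier initial_size out) := by unfold Spec_generate_profile_sizes; infer_instance

-- ===== CLAIM (what is proved, stated in full; the proofs are below) =====
def Claim_equal_generate_profile_sizes : Prop := ∀ (num_sizes : Int) (multiplier : Int) (initial_size : Int), Dom_generate_profile_sizes num_sizes multiplier initial_size → Spec_generate_profile_sizes num_sizes multiplier initial_size (generate_profile_sizes num_sizes multiplier initial_size)

-- ===== LEMMAS AND PROOFS =====
lemma loopA (m i : Int) (l : List Int) :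
    List.foldl
      (fun acc (_ : Int) =>
        if acc = [] then acc ++ [i] else acc ++ [acc.getLast! * m])
      [] l
    = (List.range l.length).map (fun k => i * m ^ k) := by
  induction l using List.reverseRecOn with
  | nil => simp
  | append_singleton l x ih =>
    rw [List.foldl_append, ih]
    cases h : l.length with
    | zero => simp [h]
    | succ n =>
      have hne : (List.range (n+1)).map (fun k => i * m ^ k) ≠ [] := by simp
      have hlast : ((List.range (n+1)).map (fun k => i * m ^ k)).getLast! = i * m ^ n := by
        rw [List.range_succ, List.map_append]
        simp
      simp only [List.length_append, h, List.foldl_cons, List.foldl_nil, if_neg hne, hlast]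
      simp [List.range_succ, pow_succ, mul_assoc]

lemma floordiv_two_nat (n : Nat) : PySem.Int.floordiv (n : Int) 2 = ((n / 2 : Nat) : Int) := by
  simp [PySem.Int.floordiv, Int.fdiv_eq_ediv]

lemma altClosedNat (m : Int) : ∀ (n : Nat) (i : Int),
    generate_profile_sizes_alt (n : Int) m i = (List.range n).map (fun k => i * m ^ k) := by
  intro n
  induction n using Nat.strong_induction_on with
  | _ n ih =>
    intro i
    match n, ih with
    | 0, _ => simp [generate_profile_sizes_alt]
    | 1, _ => simp [generate_profile_sizes_alt]
    | (n+2), ih =>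
      rw [generate_profile_sizes_alt, if_neg (by omega), if_neg (by omega), floordiv_two_nat]
      have h1 : (n+2)/2 < n+2 := by omega
      have h2 : (n+2) - (n+2)/2 < n+2 := by omega
      rw [show ((n+2 : Nat) : Int) - (((n+2)/2 : Nat) : Int) = (((n+2) - (n+2)/2 : Nat) : Int) by omega]
      simp only [Int.toNat_natCast]
      rw [ih _ h1, ih _ h2,
          show List.range (n+2) = List.range ((n+2)/2) ++ (List.range ((n+2)-(n+2)/2)).map (fun x => (n+2)/2 + x) from by
            rw [← List.range_add]; congr 1; omega]
      rw [List.map_append, List.map_map]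
      congr 1
      apply List.map_congr_left
      intro k _
      simp [Function.comp, pow_add]
      ring

lemma altClosed (ns m i : Int) :
    generate_profile_sizes_alt ns m i = (List.range ns.toNat).map (fun k => i * m ^ k) := by
  by_cases h : ns ≤ 0
  · rw [generate_profile_sizes_alt, if_pos h, show ns.toNat = 0 by omega]
    simp
  · rw [show ns = ((ns.toNat : Nat) : Int) by omega, altClosedNat, Int.toNat_natCast]

theorem generate_profile_sizes_spec : Claim_equal_generate_profile_sizes := by
  intro ns m i _
  unfold Spec_generate_profile_sizes generate_profile_sizes
  rw [loopA, altClosed, PySem.List.length_pyRange_one]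
  simp
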